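-- pv_equiv track=rewrite | github.com/KishanMishra1/450DSACracker | Bitwise/Numberissparseornot.py | isSparse
-- ===== SOURCE A (Python) =====
-- def isSparse(n):
--     #Your code here
--     count=0
--     while n>0:
--         if n&1==1:
--             count+=1
--         else:
--             count=0
--         if count==2:
--             return False
--         n>>=1
--     return True
-- ===== SOURCE B (Python) =====
-- def isSparse(n):
--     # closed-form bit trick: two consecutive set bits overlap when n is ANDed
--     # with its own right shift; nonpositive n has no set bits to scan.
--     return n <= 0 or (n & (n >> 1)) == 0
-- ===== Notes on version B (the rewrite author's own statement) =====
-- stated objective: idiomatic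
-- what changed: Replaces the bit-scanning loop with a running count by the closed-form test n & (n >> 1) == 0 (no loop, no counter).
import Mathlib
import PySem

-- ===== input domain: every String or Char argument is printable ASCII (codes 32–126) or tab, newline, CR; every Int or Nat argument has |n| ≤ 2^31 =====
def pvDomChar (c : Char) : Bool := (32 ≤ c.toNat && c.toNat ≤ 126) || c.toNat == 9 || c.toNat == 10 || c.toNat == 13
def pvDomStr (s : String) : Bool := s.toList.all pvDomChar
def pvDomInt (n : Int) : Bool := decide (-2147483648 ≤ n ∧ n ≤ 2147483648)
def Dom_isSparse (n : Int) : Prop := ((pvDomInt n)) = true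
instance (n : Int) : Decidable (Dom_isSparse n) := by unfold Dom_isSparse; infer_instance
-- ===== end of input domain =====

-- B replaces A's bit-scanning loop (running count of consecutive ones) with the
-- closed-form test n <= 0 or (n & (n >> 1)) == 0 — more idiomatic, no iteration.


-- termination helper for the port of A's while loop (cited in decreasing_by)
theorem pvShiftToNatLt (n : Int) (h : 0 < n) : (n >>> (1:Nat)).toNat < n.toNat := by
  obtain ⟨m, rfl⟩ := Int.eq_ofNat_of_zero_le h.le
  show ((m >>> 1 : Nat) : Int).toNat < (m : Int).toNat
  have : m >>> 1 = m / 2 := by simp [Nat.shiftRight_succ]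
  simp [this]
  omega

-- ===== PORT A =====
def isSparseLoop (count : Int) (n : Int) : Bool :=
  if h : 0 < n then
    let count' : Int := if PySem.Int.band n 1 = 1 then count + 1 else 0
    if count' = 2 then false
    else isSparseLoop count' (n >>> (1:Nat))
  else true
termination_by n.toNat
decreasing_by exact pvShiftToNatLt n h

def isSparse (n : Int) : Bool := isSparseLoop 0 n

-- ===== PORT B =====
def isSparse_alt (n : Int) : Bool :=
  decide (n ≤ 0) || decide (PySem.Int.band n (n >>> (1:Nat)) = 0)

-- ===== PRECONDITION & SPEC =====
def Spec_isSparse (n : Int) (out : Bool) : Prop := out = isSparse_alt n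
instance (n : Int) (out : Bool) : Decidable (Spec_isSparse n out) := by unfold Spec_isSparse; infer_instance

-- ===== CLAIM (what is proved, stated in full; the proofs are below) =====
def Claim_equal_isSparse : Prop := ∀ (n : Int), Dom_isSparse n → Spec_isSparse n (isSparse n)

-- ===== LEMMAS AND PROOFS =====

theorem pv_eq_zero_iff_testBit (x : Nat) : x = 0 ↔ ∀ i, x.testBit i = false := by
  constructor
  · rintro rfl i; simp
  · intro h; exact Nat.eq_of_testBit_eq (by simp [h])

theorem pv_sparse_step (m i : Nat) :
    (m &&& m / 2).testBit (i + 1) = (m / 2 &&& m / 2 / 2).testBit i := by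
  simp only [Nat.testBit_land]
  simp only [Nat.testBit_add_one]

theorem pv_sparse_even (m : Nat) (he : m % 2 = 0) :
    (m &&& m / 2 = 0) ↔ (m / 2 &&& m / 2 / 2 = 0) := by
  rw [pv_eq_zero_iff_testBit, pv_eq_zero_iff_testBit]
  constructor
  · intro h i
    rw [← pv_sparse_step]
    exact h (i + 1)
  · intro h i
    cases i with
    | zero => simp [Nat.testBit_zero, he]
    | succ j => rw [pv_sparse_step]; exact h j

theorem pv_sparse_odd (m : Nat) (ho : m % 2 = 1) :
    (m &&& m / 2 = 0) ↔ (m / 2 % 2 = 0 ∧ m / 2 &&& m / 2 / 2 = 0) := by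
  constructor
  · intro h
    have hb := (pv_eq_zero_iff_testBit _).mp h
    constructor
    · have h0 := hb 0
      simp only [Nat.testBit_zero, ho] at h0
      simp at h0
      omega
    · refine (pv_eq_zero_iff_testBit _).mpr (fun i => ?_)
      rw [← pv_sparse_step]
      exact hb (i + 1)
  · rintro ⟨h0, h⟩
    have hb := (pv_eq_zero_iff_testBit _).mp h
    refine (pv_eq_zero_iff_testBit _).mpr (fun i => ?_)
    cases i with
    | zero =>
      simp only [Nat.testBit_land, Nat.testBit_zero]
      simp
      omega
    | succ j => rw [pv_sparse_step]; exact hb j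

theorem pv_band_cast (m : Nat) : PySem.Int.band (m : Int) 1 = ((m % 2 : Nat) : Int) := by
  have := PySem.Int.band_natCast m 1
  simpa [Nat.and_one_is_mod] using this

theorem pv_cast_shift (m : Nat) : ((m : Int) >>> (1:Nat)) = ((m / 2 : Nat) : Int) := by
  have h : m >>> 1 = m / 2 := by simp [Nat.shiftRight_succ]
  show ((m >>> 1 : Nat) : Int) = ((m / 2 : Nat) : Int)
  rw [h]

theorem pv_unfold (c : Int) (m : Nat) (hm : 0 < m) :
    isSparseLoop c (m : Int) =
      if m % 2 = 1 then
        (if c + 1 = (2 : Int) then false else isSparseLoop (c + 1) ((m / 2 : Nat) : Int))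
      else isSparseLoop 0 ((m / 2 : Nat) : Int) := by
  rw [isSparseLoop]
  have hpos : (0 : Int) < (m : Int) := by exact_mod_cast hm
  rw [dif_pos hpos, pv_band_cast, pv_cast_shift]
  by_cases hp : m % 2 = 1
  · simp [hp]
  · have h0 : m % 2 = 0 := by omega
    simp [h0]

theorem pv_loop_eq (m : Nat) :
    isSparseLoop 0 (m : Int) = decide (m &&& m / 2 = 0) ∧
    isSparseLoop 1 (m : Int) = decide (m % 2 = 0 ∧ m &&& m / 2 = 0) := by
  induction m using Nat.strong_induction_on with
  | _ m ih =>
    rcases Nat.eq_zero_or_pos m with hm | hm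
    · subst hm
      constructor <;> · rw [isSparseLoop]; norm_num
    · have hlt : m / 2 < m := Nat.div_lt_self hm (by norm_num)
      have ihh := ih (m / 2) hlt
      rcases Nat.mod_two_eq_zero_or_one m with hpar | hpar
      · constructor
        · rw [pv_unfold 0 m hm, if_neg (by omega), ihh.1]
          simp only [decide_eq_decide]
          exact (pv_sparse_even m hpar).symm
        · rw [pv_unfold 1 m hm, if_neg (by omega), ihh.1]
          simp only [decide_eq_decide]
          rw [← pv_sparse_even m hpar]
          simp [hpar]
      · constructor
        · rw [pv_unfold 0 m hm, if_pos hpar, if_neg (by norm_num)]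
          have h1 : (0 : Int) + 1 = 1 := by norm_num
          rw [h1, ihh.2]
          simp only [decide_eq_decide]
          exact (pv_sparse_odd m hpar).symm
        · rw [pv_unfold 1 m hm, if_pos hpar, if_pos (by norm_num)]
          simp [hpar]

-- ===== VERDICT (by name: the statement is the Claim_ definition above) =====
theorem isSparse_spec : Claim_equal_isSparse := by
  intro n _
  unfold Spec_isSparse isSparse isSparse_alt
  rcases (by omega : n ≤ 0 ∨ 0 < n) with hn | hn
  · rw [isSparseLoop]
    have hng : ¬ (0 : Int) < n := by omega
    rw [dif_neg hng]
    simp [hn]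
  · obtain ⟨m, rfl⟩ := Int.eq_ofNat_of_zero_le hn.le
    rw [(pv_loop_eq m).1, pv_cast_shift, PySem.Int.band_natCast m (m / 2)]
    have hm : ¬ ((m : Int) ≤ 0) := by omega
    have hm0 : m ≠ 0 := by
      intro h0
      rw [h0] at hn
      exact lt_irrefl _ hn
    simp [hm0]
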